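-- pv_equiv track=rewrite | github.com/MrBrantCode/unitest_baseline | mut_generate/mist_train_cf/cf_82092/solution.py | min_2d_array
-- ===== SOURCE A (Python) =====
-- def min_2d_array(arr):
--     # Initialize minimum value to be a large number
--     min_val = float('inf')
--     positions = []
--
--     # Loop through the 2D array to find the minimum value
--     for i in range(len(arr)):
--         for j in range(len(arr[i])):
--             if arr[i][j] < min_val:
--                 min_val = arr[i][j]
--                 # Store the positions of the new minimum value
--                 positions = [(i, j)]
--             elif arr[i][j] == min_val:
--                 # If current value is equal to minimum value, add its position to the list
--                 positions.append((i, j))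
--
--     return min_val, positions
-- ===== SOURCE B (Python) =====
-- def min_2d_array(arr):
--     # Find the minimum first, then collect its positions in a second pass.
--     m = min(x for row in arr for x in row)
--     positions = [(i, j) for i, row in enumerate(arr)
--                  for j, x in enumerate(row) if x == m]
--     return m, positions
-- ===== Notes on version B (the rewrite author's own statement) =====
-- stated objective: simpler
-- what changed: Replaces A's single stateful tracking loop (running minimum with position-list reset/append) by a find-then-filter pair: compute the minimum with builtin min, then collect all equal positions with a comprehension.
-- outside the precondition, e.g. on min_2d_array([[], []]): A returns (inf, []), B raises ValueError; on min_2d_array([]): A returns (inf, []), B raises ValueError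
import Mathlib
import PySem

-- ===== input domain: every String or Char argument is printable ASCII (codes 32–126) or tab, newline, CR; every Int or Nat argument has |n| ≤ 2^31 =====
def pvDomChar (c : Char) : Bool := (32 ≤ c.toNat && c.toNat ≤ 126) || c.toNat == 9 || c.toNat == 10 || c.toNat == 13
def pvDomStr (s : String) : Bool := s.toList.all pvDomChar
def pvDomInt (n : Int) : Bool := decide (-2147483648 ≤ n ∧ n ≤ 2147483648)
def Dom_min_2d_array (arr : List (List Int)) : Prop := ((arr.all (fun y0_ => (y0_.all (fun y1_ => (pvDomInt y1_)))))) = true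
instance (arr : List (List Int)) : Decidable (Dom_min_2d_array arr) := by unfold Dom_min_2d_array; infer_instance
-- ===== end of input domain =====

-- B replaces A's single stateful tracking loop by a find-the-minimum pass followed by a
-- position-collecting comprehension (simpler decomposition, same cost).
-- Pre_ excludes arrays with no elements, where A returns the float sentinel (inf, []) —
-- not an Int — and B's min() raises ValueError.

-- ===== PORT A =====
-- min_val = float('inf') is modelled by `none`; every Int compares below it, exactly as in Python.
def min_2d_array (arr : List (List Int)) : Int × (List (Int × Int)) :=
  let st :=
    (PySem.List.enumerate arr).foldl
      (fun st p =>
        (PySem.List.enumerate p.2).foldl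
          (fun st q =>
            match st.1 with
            | none => (some q.2, [(p.1, q.1)])
            | some m =>
              if q.2 < m then (some q.2, [(p.1, q.1)])
              else if q.2 = m then (some m, st.2 ++ [(p.1, q.1)])
              else st)
          st)
      (none, [])
  (st.1.getD 0, st.2)   -- st.1 = none (the float inf sentinel) only outside Pre_

-- ===== PORT B =====
def min_2d_array_alt (arr : List (List Int)) : Int × (List (Int × Int)) :=
  match PySem.List.min? arr.flatten (fun x => x) with
  | none => (0, [])   -- Python raises ValueError here; outside Pre_
  | some m =>
    (m, (PySem.List.enumerate arr).flatMap (fun p =>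
          (PySem.List.enumerate p.2).filterMap (fun q =>
            if q.2 = m then some (p.1, q.1) else none)))

-- ===== PRECONDITION & SPEC =====
-- Pre_ excludes arrays with no elements at all: there A returns (float('inf'), []) — not an
-- Int value — and B's min() raises ValueError.
def Pre_min_2d_array (arr : List (List Int)) : Prop := arr.flatten ≠ []
instance (arr : List (List Int)) : Decidable (Pre_min_2d_array arr) := by unfold Pre_min_2d_array; infer_instance
def pvWitness_min_2d_array : List (List Int) := [[3, 1], [1, 2]]

def Spec_min_2d_array (arr : List (List Int)) (out : Int × (List (Int × Int))) : Prop := out = min_2d_array_alt arr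
instance (arr : List (List Int)) (out : Int × (List (Int × Int))) : Decidable (Spec_min_2d_array arr out) := by unfold Spec_min_2d_array; infer_instance

-- ===== CLAIM (what is proved, stated in full; the proofs are below) =====
def Claim_equal_min_2d_array : Prop := ∀ (arr : List (List Int)), Dom_min_2d_array arr → Pre_min_2d_array arr → Spec_min_2d_array arr (min_2d_array arr)

-- ===== LEMMAS AND PROOFS =====

-- the flattened row-major list of (position, value) pairs
def pvPairs (arr : List (List Int)) : List ((Int × Int) × Int) :=
  (PySem.List.enumerate arr).flatMap (fun p =>
    (PySem.List.enumerate p.2).map (fun q => ((p.1, q.1), q.2)))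

-- A's inner-loop body, lifted to a single (position, value) pair
def pvStep (st : Option Int × List (Int × Int)) (pv : (Int × Int) × Int) : Option Int × List (Int × Int) :=
  match st.1 with
  | none => (some pv.2, [pv.1])
  | some m =>
    if pv.2 < m then (some pv.2, [pv.1])
    else if pv.2 = m then (some m, st.2 ++ [pv.1])
    else st

def pvMin (l : List ((Int × Int) × Int)) (m : Int) : Int := l.foldl (fun a pv => min a pv.2) m
def pvPos (l : List ((Int × Int) × Int)) (m : Int) : List (Int × Int) :=
  l.filterMap (fun pv => if pv.2 = m then some pv.1 else none)

lemma pvMin_le (l : List ((Int × Int) × Int)) (m : Int) : pvMin l m ≤ m := by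
  induction l generalizing m with
  | nil => simp [pvMin]
  | cons pv t ih => exact le_trans (ih (min m pv.2)) (min_le_left _ _)

lemma pvFold_some (l : List ((Int × Int) × Int)) (m : Int) (acc : List (Int × Int)) :
    l.foldl pvStep (some m, acc) =
      (some (pvMin l m), (if pvMin l m = m then acc else []) ++ pvPos l (pvMin l m)) := by
  induction l generalizing m acc with
  | nil => simp [pvMin, pvPos]
  | cons pv t ih =>
    have hle := pvMin_le t (min m pv.2)
    simp only [List.foldl_cons, pvStep]
    rcases lt_trichotomy pv.2 m with h | h | h
    · rw [if_pos h, ih]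
      have hmin : pvMin (pv :: t) m = pvMin t pv.2 := by
        simp [pvMin, min_eq_right (le_of_lt h)]
      rw [hmin]
      by_cases he : pvMin t pv.2 = pv.2
      · simp only [he]
        have : ¬ pv.2 = m := ne_of_lt h
        simp [pvPos, this]
      · have hlt : pvMin t pv.2 < pv.2 := lt_of_le_of_ne (pvMin_le t pv.2) he
        have h1 : ¬ pvMin t pv.2 = m := ne_of_lt (lt_trans hlt h)
        have h2 : ¬ pv.2 = pvMin t pv.2 := (ne_of_lt hlt).symm
        simp [pvPos, he, h1, h2]
    · rw [if_neg (by omega : ¬ pv.2 < m), if_pos h, ih]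
      have hmin : pvMin (pv :: t) m = pvMin t m := by simp [pvMin, h]
      rw [hmin]
      by_cases he : pvMin t m = m
      · simp [pvPos, he, h]
      · have hlt : pvMin t m < m := lt_of_le_of_ne (pvMin_le t m) he
        simp [pvPos, he, h, (ne_of_lt hlt).symm]
    · have h1 : ¬ pv.2 < m := not_lt_of_gt h
      have h2 : ¬ pv.2 = m := (ne_of_lt h).symm
      simp only [if_neg h1, if_neg h2]
      rw [ih]
      have hmin : pvMin (pv :: t) m = pvMin t m := by
        simp [pvMin, min_eq_left (le_of_lt h)]
      rw [hmin]
      have h3 : ¬ pv.2 = pvMin t m :=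
        fun hc => absurd (hc ▸ (pvMin_le t m)) (not_le_of_gt h)
      simp [pvPos, h3]

lemma pvFold_none (pv : (Int × Int) × Int) (t : List ((Int × Int) × Int)) :
    (pv :: t).foldl pvStep (none, []) =
      (some (pvMin t pv.2), pvPos (pv :: t) (pvMin t pv.2)) := by
  simp only [List.foldl_cons, pvStep]
  rw [pvFold_some]
  by_cases he : pvMin t pv.2 = pv.2
  · simp [pvPos, he]
  · have hlt : pvMin t pv.2 < pv.2 := lt_of_le_of_ne (pvMin_le t pv.2) he
    simp [pvPos, he, (ne_of_lt hlt).symm]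

-- A's nested fold over enumerated rows is the flat fold of pvStep over pvPairs
lemma pvA_eq_flat (arr : List (List Int)) :
    min_2d_array arr = (((pvPairs arr).foldl pvStep (none, [])).1.getD 0,
                        ((pvPairs arr).foldl pvStep (none, [])).2) := by
  simp only [min_2d_array, pvPairs, List.foldl_flatMap, List.foldl_map, pvStep]

-- values of pvPairs, in order, are the flattened array
lemma pvSnd_flatMap (l : List (Int × List Int)) :
    ((l.flatMap (fun p => (PySem.List.enumerate p.2).map (fun q => ((p.1, q.1), q.2)))).map (·.2))
      = (l.map (·.2)).flatten := by
  induction l with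
  | nil => simp
  | cons p tl ih =>
    simp only [List.flatMap_cons, List.map_append, List.flatten_cons, ih, List.map_map,
      List.map_cons]
    congr 1
    exact PySem.List.map_snd_enumerate ..

lemma pvPairs_snd (arr : List (List Int)) :
    (pvPairs arr).map (·.2) = arr.flatten := by
  unfold pvPairs
  rw [pvSnd_flatMap, PySem.List.map_snd_enumerate]

lemma pvPos_eq_B (arr : List (List Int)) (m : Int) :
    pvPos (pvPairs arr) m =
      (PySem.List.enumerate arr).flatMap (fun p =>
        (PySem.List.enumerate p.2).filterMap (fun q =>
          if q.2 = m then some (p.1, q.1) else none)) := by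
  simp [pvPos, pvPairs, List.filterMap_flatMap, List.filterMap_map, Function.comp]

lemma pvMin_eq_foldl (t : List ((Int × Int) × Int)) (x : Int) :
    pvMin t x = (t.map (·.2)).foldl min x := by
  induction t generalizing x with
  | nil => rfl
  | cons pv tl ih =>
    simp only [pvMin, List.foldl_cons, List.map_cons]
    exact ih (min x pv.2)

-- ===== VERDICT (by name: the statement is the Claim_ definition above) =====
theorem min_2d_array_spec : Claim_equal_min_2d_array := by
  intro arr _ hpre
  unfold Spec_min_2d_array
  have hne : pvPairs arr ≠ [] := by
    intro h
    apply hpre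
    have hs := pvPairs_snd arr
    rw [h] at hs
    simpa using hs.symm
  obtain ⟨pv, t, hpt⟩ := List.exists_cons_of_ne_nil hne
  have hflat : arr.flatten = pv.2 :: t.map (·.2) := by
    rw [← pvPairs_snd, hpt, List.map_cons]
  have hA : min_2d_array arr = (pvMin t pv.2, pvPos (pv :: t) (pvMin t pv.2)) := by
    rw [pvA_eq_flat, hpt, pvFold_none]
    simp
  have hmin : PySem.List.min? arr.flatten (fun x => x) = some (pvMin t pv.2) := by
    rw [hflat, PySem.List.min?_id_cons, pvMin_eq_foldl]
  have hB : min_2d_array_alt arr = (pvMin t pv.2, pvPos (pvPairs arr) (pvMin t pv.2)) := by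
    simp only [min_2d_array_alt, hmin, pvPos_eq_B]
  rw [hA, hB, hpt]
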